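-- pv_equiv track=rewrite | github.com/tbvanderwoude/icts-m | src/mapfm/solver.py | enumerate_matchings
-- ===== SOURCE A (Python) =====
-- from copy import copy
--
-- def enumerate_matchings(agents, tasks):
--     if agents:
--         (name, type), *tail = agents
--         results = []
--         for (i, (task_name, task_type)) in enumerate(tasks):
--             if type == task_type:
--                 tasks_cp = copy(tasks)
--                 tasks_cp.pop(i)
--                 if tail:
--                     results.extend(
--                         map(
--                             lambda rs: [(type,(name, task_name))] + rs,
--                             enumerate_matchings(tail, tasks_cp),
--                         )
--                     )
--                 else:
--                     results.append([(type,(name, task_name))])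
--         return results
--     else:
--         return []
-- ===== SOURCE B (Python) =====
-- def enumerate_matchings(agents, tasks):
--     if not agents:
--         return []
--     # iterative worklist: each state = (partial matching so far, remaining tasks)
--     states = [([], tasks)]
--     for (name, type) in agents:
--         next_states = []
--         for (partial, remaining) in states:
--             for i, (task_name, task_type) in enumerate(remaining):
--                 if type == task_type:
--                     rem_cp = remaining.copy()
--                     rem_cp.pop(i)
--                     next_states.append((partial + [(type, (name, task_name))], rem_cp))
--         states = next_states
--     return [partial for (partial, _) in states]
-- ===== Notes on version B (the rewrite author's own statement) =====
-- stated objective: alternative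
-- what changed: Replaces the recursion over agents (with per-branch list concatenation) by an iterative worklist of (partial matching, remaining tasks) states expanded agent by agent, returning the partials at the end.
import Mathlib
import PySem

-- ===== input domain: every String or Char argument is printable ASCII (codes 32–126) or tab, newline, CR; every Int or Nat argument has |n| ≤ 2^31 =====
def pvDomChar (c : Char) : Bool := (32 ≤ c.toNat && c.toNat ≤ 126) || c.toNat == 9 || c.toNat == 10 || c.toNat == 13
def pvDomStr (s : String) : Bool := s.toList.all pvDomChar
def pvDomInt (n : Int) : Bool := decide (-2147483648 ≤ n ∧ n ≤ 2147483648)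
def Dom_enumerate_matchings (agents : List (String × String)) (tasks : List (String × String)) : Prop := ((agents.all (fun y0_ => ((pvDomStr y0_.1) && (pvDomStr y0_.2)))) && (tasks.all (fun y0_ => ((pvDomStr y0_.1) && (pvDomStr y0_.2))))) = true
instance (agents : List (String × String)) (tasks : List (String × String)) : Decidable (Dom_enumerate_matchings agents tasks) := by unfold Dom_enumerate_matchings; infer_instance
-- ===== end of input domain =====

-- B is an alternative decomposition: an iterative worklist of (partial, remaining-tasks)
-- states expanded agent by agent, instead of A's recursion over the agent list.

-- ===== PORT A =====
-- Literal port of A's recursion; 'tasks_cp = copy(tasks); tasks_cp.pop(i)' is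
-- tasks.eraseIdx i.toNat — exact because i comes from enumerate(tasks), so 0 ≤ i < len(tasks).
mutual
  def enumerate_matchings (agents : List (String × String)) (tasks : List (String × String)) : List (List (String × (String × String))) :=
    match agents with
    | [] => []
    | (name, ty) :: tail => emLoopA name ty tail tasks (PySem.List.enumerate tasks 0) []
  termination_by (agents.length, tasks.length + 1)

  -- the 'for (i, (task_name, task_type)) in enumerate(tasks)' loop, accumulating 'results'
  def emLoopA (name ty : String) (tail tasks : List (String × String))
      (enum : List (Int × (String × String)))
      (results : List (List (String × (String × String)))) : List (List (String × (String × String))) :=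
    match enum with
    | [] => results
    | (i, (task_name, task_type)) :: rest =>
      emLoopA name ty tail tasks rest
        (if ty == task_type then
          let tasks_cp := tasks.eraseIdx i.toNat
          if tail.isEmpty then results ++ [[(ty, (name, task_name))]]
          else results ++ (enumerate_matchings tail tasks_cp).map (fun rs => (ty, (name, task_name)) :: rs)
        else results)
  termination_by (tail.length + 1, enum.length)
end

-- ===== PORT B =====
-- one agent step of Source B: expand every state by every compatible remaining task
def emStepB (states : List (List (String × (String × String)) × List (String × String)))
    (agent : String × String) : List (List (String × (String × String)) × List (String × String)) :=
  states.foldl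
    (fun next st =>
      (PySem.List.enumerate st.2 0).foldl
        (fun next p =>
          if agent.2 == p.2.2 then
            next ++ [(st.1 ++ [(agent.2, (agent.1, p.2.1))], st.2.eraseIdx p.1.toNat)]
          else next)
        next)
    []

def enumerate_matchings_alt (agents : List (String × String)) (tasks : List (String × String)) : List (List (String × (String × String))) :=
  if agents.isEmpty then []
  else (agents.foldl emStepB [([], tasks)]).map (·.1)

-- ===== PRECONDITION & SPEC =====
def Spec_enumerate_matchings (agents : List (String × String)) (tasks : List (String × String)) (out : List (List (String × (String × String)))) : Prop := out = enumerate_matchings_alt agents tasks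
instance (agents : List (String × String)) (tasks : List (String × String)) (out : List (List (String × (String × String)))) : Decidable (Spec_enumerate_matchings agents tasks out) := by unfold Spec_enumerate_matchings; infer_instance

-- ===== CLAIM (what is proved, stated in full; the proofs are below) =====
def Claim_equal_enumerate_matchings : Prop := ∀ (agents : List (String × String)) (tasks : List (String × String)), Dom_enumerate_matchings agents tasks → Spec_enumerate_matchings agents tasks (enumerate_matchings agents tasks)

-- ===== LEMMAS AND PROOFS =====

-- compatible picks of a task from `tasks` for an agent of type `ty`:
-- (task name, remaining tasks) pairs, in task order
def picks (ty : String) (tasks : List (String × String)) : List (String × List (String × String)) :=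
  ((PySem.List.enumerate tasks 0).filter (fun p => ty == p.2.2)).map
    (fun p => (p.2.1, tasks.eraseIdx p.1.toNat))

-- clean recursive characterization shared by both ports (G [] _ = [[]])
def G : List (String × String) → List (String × String) → List (List (String × (String × String)))
  | [], _ => [[]]
  | (name, ty) :: tail, tasks =>
    (picks ty tasks).flatMap (fun q => (G tail q.2).map (fun rs => (ty, (name, q.1)) :: rs))

theorem emLoopA_char (name ty : String) (tail tasks : List (String × String))
    (enum : List (Int × (String × String))) (results : List (List (String × (String × String)))) :
    emLoopA name ty tail tasks enum results =
      results ++ (enum.filter (fun p => ty == p.2.2)).flatMap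
        (fun p =>
          if tail.isEmpty then [[(ty, (name, p.2.1))]]
          else (enumerate_matchings tail (tasks.eraseIdx p.1.toNat)).map
            (fun rs => (ty, (name, p.2.1)) :: rs)) := by
  induction enum generalizing results with
  | nil => simp [emLoopA]
  | cons hd tl ih =>
    obtain ⟨i, tn, tt⟩ := hd
    rw [emLoopA, ih]
    by_cases h : ty == tt
    · by_cases ht : tail.isEmpty <;> simp [h, ht]
    · simp [h]

theorem em_eq_G (agents : List (String × String)) (tasks : List (String × String))
    (h : agents ≠ []) : enumerate_matchings agents tasks = G agents tasks := by
  induction agents generalizing tasks with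
  | nil => exact absurd rfl h
  | cons a tail ih =>
    obtain ⟨name, ty⟩ := a
    rw [enumerate_matchings, emLoopA_char, G, picks, List.flatMap_map]
    simp only [List.nil_append]
    apply List.flatMap_congr
    intro p _
    cases htail : tail with
    | nil => simp [G]
    | cons b tb =>
      rw [← htail, ih (tasks.eraseIdx p.1.toNat) (by simp [htail])]
      simp [htail]

theorem emStepB_char (states : List (List (String × (String × String)) × List (String × String)))
    (agent : String × String) :
    emStepB states agent =
      states.flatMap (fun st =>
        (picks agent.2 st.2).map (fun q => (st.1 ++ [(agent.2, (agent.1, q.1))], q.2))) := by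
  rw [emStepB]
  rw [show (states.foldl
      (fun next st =>
        (PySem.List.enumerate st.2 0).foldl
          (fun next p =>
            if agent.2 == p.2.2 then
              next ++ [(st.1 ++ [(agent.2, (agent.1, p.2.1))], st.2.eraseIdx p.1.toNat)]
            else next)
          next)
      []) = states.foldl
      (fun next st =>
        next ++ ((PySem.List.enumerate st.2 0).filter (fun p => agent.2 == p.2.2)).map
          (fun p => (st.1 ++ [(agent.2, (agent.1, p.2.1))], st.2.eraseIdx p.1.toNat)))
      [] by
    refine PySem.List.foldl_congr_mem _ _ _ _ ?_
    intro acc st _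
    rw [PySem.List.foldl_append_if]]
  rw [PySem.List.foldl_append_eq_flatMap]
  simp only [List.nil_append, picks, List.map_map]
  rfl

theorem foldB_char (agents : List (String × String))
    (S : List (List (String × (String × String)) × List (String × String))) :
    (agents.foldl emStepB S).map (·.1) =
      S.flatMap (fun st => (G agents st.2).map (fun m => st.1 ++ m)) := by
  induction agents generalizing S with
  | nil => simp [G, List.map_eq_flatMap]
  | cons a tail ih =>
    obtain ⟨name, ty⟩ := a
    rw [List.foldl_cons, ih, emStepB_char, List.flatMap_assoc]
    apply List.flatMap_congr
    intro st _
    rw [G, List.flatMap_map, List.map_flatMap]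
    apply List.flatMap_congr
    intro q _
    simp

-- ===== VERDICT (by name: the statement is the Claim_ definition above) =====
theorem enumerate_matchings_spec : Claim_equal_enumerate_matchings := by
  intro agents tasks _
  unfold Spec_enumerate_matchings enumerate_matchings_alt
  cases hA : agents with
  | nil => simp [enumerate_matchings]
  | cons a tl =>
    rw [← hA]
    have hne : agents ≠ [] := by simp [hA]
    simp only [List.isEmpty_eq_false_iff.mpr hne, if_neg Bool.false_ne_true, foldB_char]
    simp [em_eq_G agents tasks hne]
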